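-- pv_equiv track=rewrite | github.com/Gradiant/FARO | faro/ner.py | _discard_nonfreq_entities
-- ===== SOURCE A (Python) =====
-- from collections import OrderedDict
--
-- def _discard_nonfreq_entities(ent_list, num_freq):
--     """ Frequence of appearance of an entity
--
--     Keyword arguements:
--     ent_list -- list with entities detected
--     num_freq -- number of repetitions of an entity
--
--     """
--     ent_dict = OrderedDict()
--     new_ent_list = []
--
--     for ent in ent_list:
--         key = "{}_{}_{}_{}".format(ent[0],
--                                    ent[1],
--                                    ent[2],
--                                    ent[3])
--         if key not in ent_dict:
--             ent_dict[key] = [0, ent]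
--
--         ent_dict[key][0] += 1
--
--     for ent_key in ent_dict.keys():
--         if ent_dict[ent_key][0] >= num_freq:
--             new_ent_list.append(ent_dict[ent_key][1])
--
--     return new_ent_list
-- ===== SOURCE B (Python) =====
-- def _discard_nonfreq_entities(ent_list, num_freq):
--     """Recursive: keep head iff its key's total count >= num_freq, recurse on
--     the tail with all duplicates of that key removed (no dict/counter needed)."""
--     if not ent_list:
--         return []
--     head, tail = ent_list[0], ent_list[1:]
--     k = "{}_{}_{}_{}".format(head[0], head[1], head[2], head[3])
--     same = 1 + sum(1 for e in tail
--                    if "{}_{}_{}_{}".format(e[0], e[1], e[2], e[3]) == k)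
--     rest = _discard_nonfreq_entities(
--         [e for e in tail
--          if "{}_{}_{}_{}".format(e[0], e[1], e[2], e[3]) != k], num_freq)
--     return ([head] if same >= num_freq else []) + rest
-- ===== Notes on version B (the rewrite author's own statement) =====
-- stated objective: alternative
-- what changed: Instead of building an ordered dict of (count, first-entity) pairs and iterating its keys, B is a divide-and-conquer recursion with no dict/set at all: it counts the head's key in the tail, keeps or drops the head, and recurses on the tail with that key's duplicates filtered out.
import Mathlib
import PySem

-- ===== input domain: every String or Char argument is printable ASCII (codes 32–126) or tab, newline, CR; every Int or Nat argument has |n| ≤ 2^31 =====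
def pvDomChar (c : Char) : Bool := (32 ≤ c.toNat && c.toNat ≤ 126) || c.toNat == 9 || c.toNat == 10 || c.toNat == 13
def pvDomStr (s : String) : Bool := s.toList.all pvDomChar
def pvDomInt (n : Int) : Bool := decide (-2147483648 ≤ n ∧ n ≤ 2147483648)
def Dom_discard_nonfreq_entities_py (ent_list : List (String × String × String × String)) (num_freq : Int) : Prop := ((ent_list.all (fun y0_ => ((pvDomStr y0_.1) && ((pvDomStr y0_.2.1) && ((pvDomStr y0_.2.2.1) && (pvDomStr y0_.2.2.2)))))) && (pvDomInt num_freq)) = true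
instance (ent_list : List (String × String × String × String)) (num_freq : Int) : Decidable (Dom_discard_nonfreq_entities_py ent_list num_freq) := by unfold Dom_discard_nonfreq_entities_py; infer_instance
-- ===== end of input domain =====

-- B replaces A's ordered dict of (count, first-entity) pairs by a dict-free divide-and-conquer recursion: count the head's key, keep or drop the head, recurse on the tail with that key removed (alternative decomposition, not claimed faster).


-- ===== PORT A =====
-- key = "{}_{}_{}_{}".format(ent[0], ent[1], ent[2], ent[3]) (plain string concatenation; exact)
def pvKey (e : String × String × String × String) : String :=
  e.1 ++ "_" ++ e.2.1 ++ "_" ++ e.2.2.1 ++ "_" ++ e.2.2.2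

-- 'ent_dict[key][0] += 1' is ported as an overwriting insert of the looked-up pair with its
-- count incremented; the key is always present at that point, so getD's default is never used.
def discard_nonfreq_entities_py (ent_list : List (String × String × String × String)) (num_freq : Int) : List (String × String × String × String) :=
  let ent_dict : PySem.Dict String (Int × (String × String × String × String)) :=
    ent_list.foldl (fun d ent =>
      let key := pvKey ent
      let d := if d.contains key then d else d.insert key (0, ent)
      let v := d.getD key (0, ent)
      d.insert key (v.1 + 1, v.2)) PySem.Dict.empty
  -- second loop: over ent_dict.keys; the lookups always hit, defaults never used
  ent_dict.keys.foldl (fun acc k =>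
    let v := ent_dict.getD k (0, ("", "", "", ""))
    if v.1 ≥ num_freq then acc ++ [v.2] else acc) []

-- ===== PORT B =====
-- recursion on the list; 'sum(1 for e in tail if key(e) == k)' is the foldl, the
-- list comprehension is the filter, '([head] if … else []) + rest' is the final append
def discard_nonfreq_entities_py_alt (ent_list : List (String × String × String × String)) (num_freq : Int) : List (String × String × String × String) :=
  match ent_list with
  | [] => []
  | head :: tail =>
    let k := pvKey head
    let same : Int := 1 + tail.foldl (fun acc e => if pvKey e = k then acc + 1 else acc) 0
    let rest := discard_nonfreq_entities_py_alt (tail.filter (fun e => pvKey e ≠ k)) num_freq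
    (if same ≥ num_freq then [head] else []) ++ rest
termination_by ent_list.length
decreasing_by
  have h := List.length_filter_le (fun e => !decide (pvKey e.1 = pvKey head)) tail.attach
  simp only [List.length_attach] at h
  simpa using Nat.lt_succ_of_le h

-- ===== PRECONDITION & SPEC =====
def Spec_discard_nonfreq_entities_py (ent_list : List (String × String × String × String)) (num_freq : Int) (out : List (String × String × String × String)) : Prop := out = discard_nonfreq_entities_py_alt ent_list num_freq
instance (ent_list : List (String × String × String × String)) (num_freq : Int) (out : List (String × String × String × String)) : Decidable (Spec_discard_nonfreq_entities_py ent_list num_freq out) := by unfold Spec_discard_nonfreq_entities_py; infer_instance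

-- ===== CLAIM (what is proved, stated in full; the proofs are below) =====
def Claim_equal_discard_nonfreq_entities_py : Prop := ∀ (ent_list : List (String × String × String × String)) (num_freq : Int), Dom_discard_nonfreq_entities_py ent_list num_freq → Spec_discard_nonfreq_entities_py ent_list num_freq (discard_nonfreq_entities_py ent_list num_freq)

-- ===== LEMMAS AND PROOFS =====

-- first occurrences of the list, by key, relative to an already-seen key list (proof-side only)
def pvFirsts (ks : List String) : List (String × String × String × String) → List (String × String × String × String)
  | [] => []
  | e :: t => if pvKey e ∈ ks then pvFirsts ks t else e :: pvFirsts (pvKey e :: ks) t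

lemma pvFirsts_congr : ∀ (t : List (String × String × String × String)) (ks ks' : List String),
    (∀ x, x ∈ ks ↔ x ∈ ks') → pvFirsts ks t = pvFirsts ks' t := by
  intro t
  induction t with
  | nil => intro _ _ _; rfl
  | cons e t ih =>
    intro ks ks' h
    simp only [pvFirsts, h (pvKey e)]
    split
    · exact ih ks ks' h
    · rw [ih (pvKey e :: ks) (pvKey e :: ks') (by intro x; simp [h x])]

lemma pvFirsts_not_mem : ∀ (t : List (String × String × String × String)) (ks : List String)
    (e : String × String × String × String), e ∈ pvFirsts ks t → pvKey e ∉ ks := by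
  intro t
  induction t with
  | nil => intro _ _ h; simp [pvFirsts] at h
  | cons x t ih =>
    intro ks e h
    simp only [pvFirsts] at h
    split at h
    · exact ih ks e h
    · rcases List.mem_cons.mp h with rfl | h
      · assumption
      · have := ih _ e h; intro hk; exact this (List.mem_cons_of_mem _ hk)

-- dropping every element with a seen key commutes with pvFirsts
lemma pvFirsts_filter_out (k : String) : ∀ (t : List (String × String × String × String)) (ks : List String),
    pvFirsts (k :: ks) t = pvFirsts ks (t.filter (fun e => pvKey e ≠ k)) := by
  intro t
  induction t with
  | nil => intro ks; rfl
  | cons e t ih =>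
    intro ks
    by_cases hek : pvKey e = k
    · rw [List.filter_cons_of_neg (by simp [hek])]
      have h1 : pvKey e ∈ k :: ks := by simp [hek]
      simp only [pvFirsts, h1, if_true]
      exact ih ks
    · rw [List.filter_cons_of_pos (by simp [hek])]
      by_cases hm : pvKey e ∈ ks
      · have h1 : pvKey e ∈ k :: ks := List.mem_cons_of_mem _ hm
        simp only [pvFirsts, h1, hm, if_true]
        exact ih ks
      · have h1 : pvKey e ∉ k :: ks := by simp [hek, hm]
        simp only [pvFirsts, h1, hm, if_false]
        rw [pvFirsts_congr t (pvKey e :: k :: ks) (k :: pvKey e :: ks)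
          (by intro x; constructor <;> (intro h; simp at h ⊢; tauto)), ih (pvKey e :: ks)]

-- counts of a key ≠ k are unchanged by filtering k out
lemma count_filter_out (k a : String) (ha : a ≠ k) : ∀ (t : List (String × String × String × String)),
    ((t.filter (fun e => pvKey e ≠ k)).map pvKey).count a = (t.map pvKey).count a := by
  intro t
  induction t with
  | nil => rfl
  | cons e t ih =>
    simp only [ne_eq, decide_not] at ih ⊢
    by_cases hek : pvKey e = k
    · rw [List.filter_cons_of_neg (by simp [hek])]
      have hba : (pvKey e == a) = false := by
        rw [beq_eq_false_iff_ne, hek]; exact fun h => ha h.symm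
      simp [List.count_cons, ih, hba]
    · rw [List.filter_cons_of_pos (by simp [hek])]
      simp [List.count_cons, ih]

lemma pvFirsts_keys_nodup : ∀ (t : List (String × String × String × String)) (ks : List String),
    ((pvFirsts ks t).map pvKey).Nodup := by
  intro t
  induction t with
  | nil => intro ks; simp [pvFirsts]
  | cons e t ih =>
    intro ks
    simp only [pvFirsts]
    split
    · exact ih ks
    · simp only [List.map_cons, List.nodup_cons]
      refine ⟨?_, ih (pvKey e :: ks)⟩
      intro hmem
      obtain ⟨f, hf, hfk⟩ := List.mem_map.mp hmem
      exact (pvFirsts_not_mem t _ f hf) (by rw [hfk]; exact List.mem_cons_self)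

lemma A_loop (t : List (String × String × String × String)) :
    ∀ (d : PySem.Dict String (Int × (String × String × String × String))), d.keys.Nodup →
    (t.foldl (fun d ent =>
      let key := pvKey ent
      let d := if d.contains key then d else d.insert key (0, ent)
      let v := d.getD key (0, ent)
      d.insert key (v.1 + 1, v.2)) d).items =
      d.items.map (fun p => (p.1, (p.2.1 + ((t.map pvKey).count p.1 : Int), p.2.2)))
      ++ (pvFirsts d.keys t).map (fun e => (pvKey e, (((t.map pvKey).count (pvKey e) : Int), e))) := by
  induction t with
  | nil =>
    intro d _
    simp [pvFirsts]
  | cons e t ih =>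
    intro d hnd
    simp only [List.foldl_cons]
    by_cases hm : pvKey e ∈ d.keys
    · -- existing key: the conditional insert is skipped, the stored pair's count is bumped
      have hc : d.contains (pvKey e) = true := by
        rw [PySem.Dict.contains_eq_decide_mem_keys]; exact decide_eq_true hm
      have hmem : ∃ p ∈ d.items, p.1 = pvKey e := by
        simpa only [PySem.Dict.keys, List.mem_map] using hm
      obtain ⟨p, hp, hpk⟩ := hmem
      have hv : d.getD (pvKey e) (0, e) = p.2 := by
        apply PySem.Dict.getD_of_mem_items d _ hnd
        rw [← hpk]; exact hp
      simp only [hc, if_true, hv]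
      have hnd' : (d.insert (pvKey e) (p.2.1 + 1, p.2.2)).keys.Nodup := by
        rw [PySem.Dict.keys_insert_of_contains d _ hc]; exact hnd
      rw [ih _ hnd']
      rw [PySem.Dict.keys_insert_of_contains d _ hc]
      rw [PySem.Dict.items_insert_of_contains d _ hc]
      rw [List.map_map]
      have hfe : pvFirsts d.keys (e :: t) = pvFirsts d.keys t := by simp [pvFirsts, hm]
      rw [hfe]
      congr 1
      · apply List.map_congr_left
        intro q hq
        by_cases hqk : q.1 = pvKey e
        · have hq2 : q.2 = p.2 := by
            have h1 : d.getD q.1 (0, e) = q.2 :=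
              PySem.Dict.getD_of_mem_items d (by exact hq) hnd _
            rw [hqk, hv] at h1; exact h1.symm
          simp only [Function.comp, hqk, beq_self_eq_true, if_true, List.map_cons,
            List.count_cons, beq_self_eq_true]
          rw [hq2]
          refine Prod.ext rfl (Prod.ext ?_ rfl)
          push_cast
          ring
        · have hqk' : ¬ (pvKey e = q.1) := fun h => hqk h.symm
          simp [Function.comp, hqk, hqk']
      · apply List.map_congr_left
        intro f hf
        have hne : ¬ (pvKey e = pvKey f) := by
          intro h; exact (pvFirsts_not_mem t d.keys f hf) (h ▸ hm)
        simp [hne]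
    · -- fresh key: insert (0, ent) then bump to (1, ent); both keys and items grow at the end
      have hc : d.contains (pvKey e) = false := by
        rw [PySem.Dict.contains_eq_decide_mem_keys]; exact decide_eq_false hm
      simp only [hc, if_false, Bool.false_eq_true]
      have hc2 : (d.insert (pvKey e) (0, e)).contains (pvKey e) = true :=
        PySem.Dict.contains_insert_self d _ _
      rw [PySem.Dict.getD_insert_self]
      have hkeys' : ((d.insert (pvKey e) (0, e)).insert (pvKey e) ((0:Int) + 1, e)).keys = d.keys ++ [pvKey e] := by
        rw [PySem.Dict.keys_insert_of_contains _ _ hc2, PySem.Dict.keys_insert_of_not_contains d _ hc]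
      have hnd' : ((d.insert (pvKey e) (0, e)).insert (pvKey e) ((0:Int) + 1, e)).keys.Nodup := by
        rw [hkeys']
        refine List.Nodup.append hnd (List.nodup_singleton _) ?_
        intro x hx hx'
        rw [List.mem_singleton] at hx'
        exact hm (hx' ▸ hx)
      have hitems' : ((d.insert (pvKey e) (0, e)).insert (pvKey e) ((0:Int) + 1, e)).items
          = d.items ++ [(pvKey e, ((0:Int) + 1, e))] := by
        rw [PySem.Dict.items_insert_of_contains _ _ hc2, PySem.Dict.items_insert_of_not_contains d _ hc]
        rw [List.map_append]
        congr 1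
        · rw [List.map_congr_left (g := id) ?_, List.map_id]
          intro q hq
          have hq1 : q.1 ∈ d.keys := by
            simp only [PySem.Dict.keys, List.mem_map]; exact ⟨q, hq, rfl⟩
          have : ¬ (q.1 = pvKey e) := fun h => hm (h ▸ hq1)
          simp [this]
        · simp
      have hfe : pvFirsts d.keys (e :: t) = e :: pvFirsts (pvKey e :: d.keys) t := by
        simp [pvFirsts, hm]
      rw [ih _ hnd', hkeys', hitems', hfe, List.map_append,
        pvFirsts_congr t (d.keys ++ [pvKey e]) (pvKey e :: d.keys)
          (by intro x; simp [or_comm]),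
        List.map_singleton, List.append_assoc, List.singleton_append, List.map_cons]
      congr 1
      · apply List.map_congr_left
        intro q hq
        have hq1 : q.1 ∈ d.keys := by
          simp only [PySem.Dict.keys, List.mem_map]; exact ⟨q, hq, rfl⟩
        have : ¬ (pvKey e = q.1) := fun h => hm (h ▸ hq1)
        simp [this]
      congr 1
      · refine Prod.ext rfl (Prod.ext ?_ rfl)
        simp only [List.count_cons, beq_self_eq_true, if_true]
        push_cast
        ring
      · apply List.map_congr_left
        intro f hf
        have hne : ¬ (pvKey e = pvKey f) := by
          intro h
          exact (pvFirsts_not_mem t (pvKey e :: d.keys) f hf) (by rw [← h]; exact List.mem_cons_self)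
        simp [hne]

-- A's result is the first occurrence of each key, filtered by total key count
lemma A_char (ent_list : List (String × String × String × String)) (num_freq : Int) :
    discard_nonfreq_entities_py ent_list num_freq
    = (pvFirsts [] ent_list).filter (fun e => decide (((ent_list.map pvKey).count (pvKey e) : Int) ≥ num_freq)) := by
  show (List.foldl (fun d ent =>
      let key := pvKey ent
      let d := if d.contains key then d else d.insert key ((0:Int), ent)
      let v := d.getD key ((0:Int), ent)
      d.insert key (v.1 + 1, v.2)) PySem.Dict.empty ent_list).keys.foldl (fun acc k =>
        let v := (List.foldl (fun d ent =>
          let key := pvKey ent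
          let d := if d.contains key then d else d.insert key ((0:Int), ent)
          let v := d.getD key ((0:Int), ent)
          d.insert key (v.1 + 1, v.2)) PySem.Dict.empty ent_list).getD k ((0:Int), ("", "", "", ""))
        if v.1 ≥ num_freq then acc ++ [v.2] else acc) [] = _
  have hnd0 : (PySem.Dict.empty : PySem.Dict String (Int × (String × String × String × String))).keys.Nodup := by
    simp [PySem.Dict.keys_empty]
  set d : PySem.Dict String (Int × (String × String × String × String)) :=
    List.foldl (fun d ent =>
      let key := pvKey ent
      let d := if d.contains key then d else d.insert key ((0:Int), ent)
      let v := d.getD key ((0:Int), ent)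
      d.insert key (v.1 + 1, v.2)) PySem.Dict.empty ent_list with hd
  have hitems : d.items = (pvFirsts [] ent_list).map
      (fun e => (pvKey e, (((ent_list.map pvKey).count (pvKey e) : Int), e))) := by
    rw [hd, A_loop ent_list _ hnd0]
    have h1 : (PySem.Dict.empty : PySem.Dict String (Int × (String × String × String × String))).items = [] := rfl
    have h2 : (PySem.Dict.empty : PySem.Dict String (Int × (String × String × String × String))).keys = [] := rfl
    rw [h1, h2]
    simp
  have hkeys : d.keys = (pvFirsts [] ent_list).map pvKey := by
    simp only [PySem.Dict.keys, hitems, List.map_map]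
    rfl
  have hndk : d.keys.Nodup := by rw [hkeys]; exact pvFirsts_keys_nodup ent_list []
  rw [hkeys, List.foldl_map]
  rw [PySem.List.foldl_congr_mem _ _
    (fun acc e => if ((ent_list.map pvKey).count (pvKey e) : Int) ≥ num_freq then acc ++ [e] else acc) _
    (by
      intro acc e he
      have hmem : (pvKey e, (((ent_list.map pvKey).count (pvKey e) : Int), e)) ∈ d.items := by
        rw [hitems]; exact List.mem_map.mpr ⟨e, he, rfl⟩
      rw [PySem.Dict.getD_of_mem_items d hmem hndk])]
  rw [PySem.List.foldl_append_ite_eq_filter (fun e => ((ent_list.map pvKey).count (pvKey e) : Int) ≥ num_freq)]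
  simp

-- one-step unfolding of B's recursion
lemma alt_nil (num_freq : Int) : discard_nonfreq_entities_py_alt [] num_freq = [] := by
  rw [discard_nonfreq_entities_py_alt]

lemma alt_cons (head : String × String × String × String) (tail : List (String × String × String × String)) (num_freq : Int) :
    discard_nonfreq_entities_py_alt (head :: tail) num_freq
    = (if 1 + tail.foldl (fun acc e => if pvKey e = pvKey head then acc + 1 else acc) 0 ≥ num_freq then [head] else [])
      ++ discard_nonfreq_entities_py_alt (tail.filter (fun e => pvKey e ≠ pvKey head)) num_freq := by
  rw [discard_nonfreq_entities_py_alt]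

-- B computes the same characterisation, by induction on a length bound
lemma B_char_aux : ∀ (n : Nat) (ent_list : List (String × String × String × String)) (num_freq : Int),
    ent_list.length ≤ n →
    discard_nonfreq_entities_py_alt ent_list num_freq
    = (pvFirsts [] ent_list).filter (fun e => decide (((ent_list.map pvKey).count (pvKey e) : Int) ≥ num_freq)) := by
  intro n
  induction n with
  | zero =>
    intro l nf h
    cases l with
    | nil => rw [alt_nil]; rfl
    | cons a t => simp at h
  | succ n ih =>
    intro l nf h
    cases l with
    | nil => rw [alt_nil]; rfl
    | cons head tail =>
      rw [alt_cons]
      have hsame : 1 + tail.foldl (fun acc e => if pvKey e = pvKey head then acc + 1 else acc) 0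
          = (((head :: tail).map pvKey).count (pvKey head) : Int) := by
        rw [PySem.List.foldl_ite_add_one (fun e => pvKey e = pvKey head)]
        have hc : tail.countP (fun e => decide (pvKey e = pvKey head)) = (tail.map pvKey).count (pvKey head) := by
          rw [List.count, List.countP_map]
          apply List.countP_congr
          intro e _
          simp
        simp only [List.map_cons, List.count_cons, beq_self_eq_true, if_true]
        push_cast [hc]
        ring
      have hfe : pvFirsts ([] : List String) (head :: tail) = head :: pvFirsts [pvKey head] tail := by
        simp [pvFirsts]
      rw [hfe, List.filter_cons]
      have hlen : (tail.filter (fun e => pvKey e ≠ pvKey head)).length ≤ n := by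
        have := List.length_filter_le (fun e => decide (pvKey e ≠ pvKey head)) tail
        simp only [List.length_cons] at h
        omega
      have hrest : (pvFirsts [pvKey head] tail).filter
          (fun e => decide ((((head :: tail).map pvKey).count (pvKey e) : Int) ≥ nf))
          = discard_nonfreq_entities_py_alt (tail.filter (fun e => pvKey e ≠ pvKey head)) nf := by
        rw [pvFirsts_filter_out (pvKey head) tail []]
        rw [ih _ nf hlen]
        apply List.filter_congr
        intro e he
        have hne : pvKey e ≠ pvKey head := by
          have := pvFirsts_not_mem _ _ _ ((pvFirsts_filter_out (pvKey head) tail []) ▸ he)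
          simpa using this
        have h1 : ((head :: tail).map pvKey).count (pvKey e) = (tail.map pvKey).count (pvKey e) := by
          have : (pvKey head == pvKey e) = false := by
            rw [beq_eq_false_iff_ne]; exact fun hx => hne hx.symm
          simp [List.count_cons, this]
        rw [h1, count_filter_out _ _ hne]
      rw [hrest, ← hsame]
      by_cases hge : 1 + tail.foldl (fun acc e => if pvKey e = pvKey head then acc + 1 else acc) 0 ≥ nf <;> simp [hge]

lemma B_char (ent_list : List (String × String × String × String)) (num_freq : Int) :
    discard_nonfreq_entities_py_alt ent_list num_freq
    = (pvFirsts [] ent_list).filter (fun e => decide (((ent_list.map pvKey).count (pvKey e) : Int) ≥ num_freq)) :=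
  B_char_aux ent_list.length ent_list num_freq le_rfl

lemma pv_ab_eq (ent_list : List (String × String × String × String)) (num_freq : Int) :
    discard_nonfreq_entities_py ent_list num_freq = discard_nonfreq_entities_py_alt ent_list num_freq := by
  rw [A_char, B_char]

-- ===== VERDICT (by name: the statement is the Claim_ definition above) =====
theorem discard_nonfreq_entities_py_spec : Claim_equal_discard_nonfreq_entities_py := by
  intro ent_list num_freq _
  unfold Spec_discard_nonfreq_entities_py
  exact pv_ab_eq ent_list num_freq
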